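-- pv_equiv track=rewrite | github.com/htnhan/dotfiles | ida/apply_struct_fields.py | fix_fields
-- ===== SOURCE A (Python) =====
-- def fix_fields(infields, ptrsize):
--     '''
--     Handle the case where the struct has gaps within its field. This happens
--     when there is an entry that fails to parse. Process like this:
--     1. Reverse the list, and use pop() to start at the top
--     2. Assume the first offset must be 0. If not, add some dummy fields to
--        fill up the empty space
--     3. Add the proper entry
--     4. Return the fixed fields
--     '''
--     fields = infields[::-1]
--     count = 0
--     newfields = list()
--     while len(fields) > 0:
--         _ea, offset, name = fields.pop()
--         cur_offset = count * ptrsize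
--         while cur_offset < offset:
--             cur_name = 'field_%x' % (cur_offset,)
--             newfields.append((-1, cur_offset, cur_name))
--             count += 1
--             cur_offset = count * ptrsize
--         newfields.append((_ea, offset, name))
--         count += 1
--     return newfields
-- ===== SOURCE B (Python) =====
-- def fix_fields(infields, ptrsize):
--     '''
--     Handle the case where the struct has gaps within its field: walk the
--     fields forward and, whenever a field starts past the next slot, emit
--     the whole block of dummy filler fields at once (the number of fillers
--     is computed in closed form by ceiling division) before the real field.
--     '''
--     newfields = []
--     count = 0
--     for _ea, offset, name in infields:
--         if count * ptrsize < offset: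
--             target = -(-offset // ptrsize)  # smallest k with k*ptrsize >= offset
--             newfields.extend((-1, k * ptrsize, 'field_%x' % (k * ptrsize,))
--                              for k in range(count, target))
--             count = target
--         newfields.append((_ea, offset, name))
--         count += 1
--     return newfields
-- ===== Notes on version B (the rewrite author's own statement) =====
-- stated objective: simpler
-- what changed: B iterates infields forward with a single fold instead of reversing and popping, and replaces A's one-dummy-at-a-time inner while loop by a closed-form ceiling-division target with a bulk range-build of the filler fields.
import Mathlib
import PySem

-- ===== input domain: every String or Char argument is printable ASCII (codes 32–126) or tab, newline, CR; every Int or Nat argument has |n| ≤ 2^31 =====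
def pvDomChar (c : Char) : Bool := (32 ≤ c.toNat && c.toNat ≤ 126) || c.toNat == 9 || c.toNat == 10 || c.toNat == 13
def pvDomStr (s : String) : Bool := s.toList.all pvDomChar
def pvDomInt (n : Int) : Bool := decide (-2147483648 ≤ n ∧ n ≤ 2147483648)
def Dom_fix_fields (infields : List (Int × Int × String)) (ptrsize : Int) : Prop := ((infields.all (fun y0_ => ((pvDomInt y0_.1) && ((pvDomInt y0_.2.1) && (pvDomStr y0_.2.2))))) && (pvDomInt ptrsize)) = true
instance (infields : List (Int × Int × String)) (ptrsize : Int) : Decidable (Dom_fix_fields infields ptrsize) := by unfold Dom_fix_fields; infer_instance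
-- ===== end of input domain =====

-- B fills each gap in one shot (dummy count computed by ceiling division, forward loop,
-- no reverse/pop); same return value as A on the inputs where A terminates.


-- ===== PORT A =====
-- 'field_%x' % (off,) : lowercase hex, '-' sign for a negative value (both Pythons use this
-- same expression; PySem has no %x primitive, so it is ported by hand — exact for every Int)
def pvFieldName (off : Int) : String :=
  if off < 0 then String.ofList ("field_-".toList ++ Nat.toDigits 16 (-off).toNat)
  else String.ofList ("field_".toList ++ Nat.toDigits 16 off.toNat)

-- A's inner 'while cur_offset < offset' loop, made total with fuel; the caller passes
-- fuel = (offset - count*ptrsize).toNat, which suffices whenever the Python loop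
-- terminates (each iteration raises cur_offset by ptrsize ≥ 1; see pvFillA_eq below).
def pvFillA (off ptrsize : Int) : Nat → Int → List (Int × Int × String) → List (Int × Int × String) × Int
  | 0, count, newfields => (newfields, count)
  | fuel + 1, count, newfields =>
    let cur := count * ptrsize
    if cur < off then
      pvFillA off ptrsize fuel (count + 1) (newfields ++ [(-1, cur, pvFieldName cur)])
    else (newfields, count)

-- A's outer 'while len(fields) > 0: … fields.pop() …' loop (pop takes the LAST element)
def pvLoopA (ptrsize : Int) (fields : List (Int × Int × String)) (count : Int)
    (newfields : List (Int × Int × String)) : List (Int × Int × String) :=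
  if hne : fields = [] then newfields
  else
    let f := fields.getLast hne
    let r := pvFillA f.2.1 ptrsize (f.2.1 - count * ptrsize).toNat count newfields
    pvLoopA ptrsize fields.dropLast (r.2 + 1) (r.1 ++ [f])
termination_by fields.length
decreasing_by
  have : fields.length ≠ 0 := fun h => hne (List.eq_nil_of_length_eq_zero h)
  simp [List.length_dropLast]; omega

def fix_fields (infields : List (Int × Int × String)) (ptrsize : Int) : List (Int × Int × String) :=
  -- fields = infields[::-1]  (PySem.List.slice?_none_none_neg_one: xs[::-1] is reverse)
  let fields := infields.reverse
  pvLoopA ptrsize fields 0 []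

-- ===== PORT B =====
def fix_fields_alt (infields : List (Int × Int × String)) (ptrsize : Int) : List (Int × Int × String) :=
  (infields.foldl
    (fun (st : List (Int × Int × String) × Int) f =>
      let newfields := st.1
      let count := st.2
      let st' :=
        if count * ptrsize < f.2.1 then
          -- target = -(-offset // ptrsize); fillers for k in range(count, target)
          let target := -(PySem.Int.floordiv (-f.2.1) ptrsize)
          (newfields ++ (PySem.List.pyRange count target 1).map
              (fun k => ((-1 : Int), k * ptrsize, pvFieldName (k * ptrsize))), target)
        else (newfields, count)
      (st'.1 ++ [f], st'.2 + 1))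
    ([], 0)).1

-- ===== PRECONDITION & SPEC =====
-- Pre_ is exactly the set of inputs on which the Python A terminates: with ptrsize ≤ 0 the
-- inner while loop runs forever as soon as any field's offset exceeds its slot, so those
-- inputs are excluded (A returns on none of them; B raises ZeroDivisionError at ptrsize = 0).
def Pre_fix_fields (infields : List (Int × Int × String)) (ptrsize : Int) : Prop :=
  0 < ptrsize ∨ ∀ i : Nat, (hi : i < infields.length) → infields[i].2.1 ≤ (i : Int) * ptrsize
instance (infields : List (Int × Int × String)) (ptrsize : Int) : Decidable (Pre_fix_fields infields ptrsize) := by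
  unfold Pre_fix_fields; infer_instance

def pvWitness_fix_fields : (List (Int × Int × String)) × Int :=
  ([(100, 0, "a"), (200, 12, "b")], 4)

def Spec_fix_fields (infields : List (Int × Int × String)) (ptrsize : Int) (out : List (Int × Int × String)) : Prop := out = fix_fields_alt infields ptrsize
instance (infields : List (Int × Int × String)) (ptrsize : Int) (out : List (Int × Int × String)) : Decidable (Spec_fix_fields infields ptrsize out) := by unfold Spec_fix_fields; infer_instance

-- ===== CLAIM (what is proved, stated in full; the proofs are below) =====
def Claim_equal_fix_fields : Prop := ∀ (infields : List (Int × Int × String)) (ptrsize : Int), Dom_fix_fields infields ptrsize → Pre_fix_fields infields ptrsize → Spec_fix_fields infields ptrsize (fix_fields infields ptrsize)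

-- ===== LEMMAS AND PROOFS =====

-- ceiling-division bracket facts used on both sides
lemma pv_tgt_le {p off count tgt : Int} (hp : 0 < p) (h1 : (tgt - 1) * p < off)
    (h2 : off ≤ count * p) : tgt ≤ count := by
  by_contra hc
  push Not at hc
  have : count * p ≤ (tgt - 1) * p := mul_le_mul_of_nonneg_right (by omega) (le_of_lt hp)
  omega

lemma pv_lt_tgt {p off count tgt : Int} (hp : 0 < p) (h1 : off ≤ tgt * p)
    (h2 : count * p < off) : count < tgt := by
  by_contra hc
  push Not at hc
  have : tgt * p ≤ count * p := mul_le_mul_of_nonneg_right hc (le_of_lt hp)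
  omega

-- A's inner loop = the closed-form block of fillers, whenever the fuel covers the gap
lemma pvFillA_eq (off p : Int) (hp : 0 < p) :
    ∀ (fuel : Nat) (count : Int) (acc : List (Int × Int × String)),
      off ≤ count * p + fuel →
      pvFillA off p fuel count acc =
        (acc ++ (PySem.List.pyRange count (max count (-(PySem.Int.floordiv (-off) p))) 1).map
            (fun k => ((-1 : Int), k * p, pvFieldName (k * p))),
         max count (-(PySem.Int.floordiv (-off) p))) := by
  have htgt := (PySem.Int.neg_floordiv_neg_eq_iff_of_pos (a := off)
      (q := -(PySem.Int.floordiv (-off) p)) hp).mp rfl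
  set tgt := -(PySem.Int.floordiv (-off) p) with htgtdef
  intro fuel
  induction fuel with
  | zero =>
    intro count acc h
    have h' : off ≤ count * p := by simpa using h
    have hle : tgt ≤ count := pv_tgt_le hp htgt.1 h'
    rw [max_eq_left hle, PySem.List.pyRange_one_eq_nil (le_refl count)]
    simp [pvFillA]
  | succ n ih =>
    intro count acc h
    by_cases hlt : count * p < off
    · have hct : count < tgt := pv_lt_tgt hp htgt.2 hlt
      have h1 : off ≤ (count + 1) * p + n := by push_cast at h ⊢; nlinarith
      have hmax : max count tgt = tgt := max_eq_right (le_of_lt hct)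
      have hmax1 : max (count + 1) tgt = tgt := max_eq_right hct
      simp only [pvFillA, if_pos hlt]
      rw [ih (count + 1) (acc ++ [(-1, count * p, pvFieldName (count * p))]) h1]
      rw [hmax, hmax1, PySem.List.pyRange_one_cons hct]
      simp
    · have h' : off ≤ count * p := not_lt.mp hlt
      have hle : tgt ≤ count := pv_tgt_le hp htgt.1 h'
      rw [max_eq_left hle, PySem.List.pyRange_one_eq_nil (le_refl count)]
      simp [pvFillA, if_neg hlt]

-- B's folding step, named for the lemmas below
def pvStepB (p : Int) (st : List (Int × Int × String) × Int) (f : Int × Int × String) :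
    List (Int × Int × String) × Int :=
  let st' :=
    if st.2 * p < f.2.1 then
      let target := -(PySem.Int.floordiv (-f.2.1) p)
      (st.1 ++ (PySem.List.pyRange st.2 target 1).map
          (fun k => ((-1 : Int), k * p, pvFieldName (k * p))), target)
    else (st.1, st.2)
  (st'.1 ++ [f], st'.2 + 1)

lemma fix_fields_alt_eq_foldl (infields : List (Int × Int × String)) (p : Int) :
    fix_fields_alt infields p = (infields.foldl (pvStepB p) ([], 0)).1 := by
  unfold fix_fields_alt pvStepB
  rfl

-- outer equivalence, ptrsize > 0: A's reversed-pop loop = B's forward fold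
lemma pvLoopA_eq_foldl_pos (p : Int) (hp : 0 < p) :
    ∀ (l : List (Int × Int × String)) (count : Int) (acc : List (Int × Int × String)),
      pvLoopA p l.reverse count acc = (l.foldl (pvStepB p) (acc, count)).1 := by
  intro l
  induction l with
  | nil => intro count acc; simp [pvLoopA]
  | cons y ys ih =>
    intro count acc
    have hne : ys.reverse ++ [y] ≠ [] := by simp
    rw [List.reverse_cons, pvLoopA]
    rw [dif_neg hne]
    simp only [List.getLast_concat, List.dropLast_concat]
    have hfuel : y.2.1 ≤ count * p + ((y.2.1 - count * p).toNat : Int) := by omega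
    rw [pvFillA_eq y.2.1 p hp _ count acc hfuel, List.foldl_cons]
    set tgt := -(PySem.Int.floordiv (-y.2.1) p) with htgtdef
    have htgt := (PySem.Int.neg_floordiv_neg_eq_iff_of_pos (a := y.2.1) (q := tgt) hp).mp rfl
    have hstep : pvStepB p (acc, count) y =
        (acc ++ (PySem.List.pyRange count (max count tgt)).map
            (fun k => ((-1 : Int), k * p, pvFieldName (k * p))) ++ [y], max count tgt + 1) := by
      unfold pvStepB
      by_cases hlt : count * p < y.2.1
      · rw [if_pos hlt, max_eq_right (le_of_lt (pv_lt_tgt hp htgt.2 hlt))]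
      · rw [if_neg hlt, max_eq_left (pv_tgt_le hp htgt.1 (not_lt.mp hlt)),
          PySem.List.pyRange_one_eq_nil (le_refl count)]
        simp
    rw [hstep]
    exact ih _ _

-- outer equivalence when every field already fits its slot (the ptrsize ≤ 0 case of Pre_):
-- neither loop ever emits a filler
lemma pvLoopA_eq_foldl_fit (p : Int) :
    ∀ (l : List (Int × Int × String)) (count : Int) (acc : List (Int × Int × String)),
      (∀ i : Nat, (hi : i < l.length) → l[i].2.1 ≤ (count + i) * p) →
      pvLoopA p l.reverse count acc = (l.foldl (pvStepB p) (acc, count)).1 := by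
  intro l
  induction l with
  | nil => intro count acc _; simp [pvLoopA]
  | cons y ys ih =>
    intro count acc h
    have h0 : y.2.1 ≤ count * p := by
      have := h 0 (by simp)
      simpa using this
    have hne : ys.reverse ++ [y] ≠ [] := by simp
    rw [List.reverse_cons, pvLoopA]
    rw [dif_neg hne]
    simp only [List.getLast_concat, List.dropLast_concat]
    have hfz : (y.2.1 - count * p).toNat = 0 := by omega
    rw [hfz]
    have hstep : pvStepB p (acc, count) y = (acc ++ [y], count + 1) := by
      unfold pvStepB
      simp only [if_neg (not_lt.mpr h0)]
    rw [List.foldl_cons, hstep]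
    simp only [pvFillA]
    exact ih (count + 1) (acc ++ [y]) (by
      intro i hi
      have := h (i + 1) (by simpa using Nat.succ_lt_succ hi)
      simpa [add_assoc, add_comm, add_left_comm] using this)

-- ===== VERDICT (by name: the statement is the Claim_ definition above) =====
theorem fix_fields_spec : Claim_equal_fix_fields := by
  intro infields ptrsize _ hpre
  unfold Spec_fix_fields
  rw [fix_fields_alt_eq_foldl]
  show pvLoopA ptrsize infields.reverse 0 [] = _
  rcases hpre with hp | hfit
  · exact pvLoopA_eq_foldl_pos ptrsize hp infields 0 []
  · exact pvLoopA_eq_foldl_fit ptrsize infields 0 [] (by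
      intro i hi
      simpa using hfit i hi)
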